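-- pv_equiv track=rewrite | github.com/sikfeng/language-modelling-for-code-switching | lstm_models/train_model.py | detect_lang
-- ===== SOURCE A (Python) =====
-- def detect_lang(sentence):
--     tokens = sentence.split()
--     en = False
--     zh = False
--     for token in tokens:
--         if token.endswith("__en"):
--             en = True
--         elif token.endswith("__zh"):
--             zh = True
--
--     if en and zh:
--         # code switched
--         return 0
--     if en:
--         # english
--         return 1
--     if zh:
--         # chinese
--         return 2
--
--     # something wrong
--     return None
-- ===== SOURCE B (Python) =====
-- def detect_lang(sentence):
--     # streaming character scanner: never builds the token list; keeps only the
--     # last <=4 non-space characters and classifies at each whitespace boundary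
--     en = zh = False
--     window = ""
--     for ch in sentence + "\n":
--         if ch.isspace():
--             en = en or window.endswith("__en")
--             zh = zh or window.endswith("__zh")
--             window = ""
--         else:
--             window = window[-3:] + ch
--     return {(True, True): 0, (True, False): 1, (False, True): 2}.get((en, zh))
-- ===== Notes on version B (the rewrite author's own statement) =====
-- stated objective: alternative
-- what changed: Replaces tokenize-then-classify (split() into a token list, loop setting flags via endswith) with a single streaming character scanner that never materializes tokens: it keeps only the last <=4 non-space characters in a bounded window and tests the suffix at each whitespace boundary, then classifies the (en,zh) pair with a dict lookup.
import Mathlib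
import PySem

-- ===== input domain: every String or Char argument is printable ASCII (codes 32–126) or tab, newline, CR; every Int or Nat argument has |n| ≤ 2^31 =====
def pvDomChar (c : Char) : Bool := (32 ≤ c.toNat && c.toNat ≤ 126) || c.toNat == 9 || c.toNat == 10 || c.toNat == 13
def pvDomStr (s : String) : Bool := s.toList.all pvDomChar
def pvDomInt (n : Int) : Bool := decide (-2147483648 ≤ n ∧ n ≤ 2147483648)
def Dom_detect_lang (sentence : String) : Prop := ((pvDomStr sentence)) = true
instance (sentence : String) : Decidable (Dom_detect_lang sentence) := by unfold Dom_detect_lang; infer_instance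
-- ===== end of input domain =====

-- B replaces A's tokenize-then-classify (split() + flag loop) by a streaming character
-- scanner with a bounded 4-char window and a dict lookup on the (en, zh) pair (alternative).

-- ===== PORT A =====
def detect_lang (sentence : String) : Option Int :=
  let tokens := PySem.Str.split₀ sentence
  let st := tokens.foldl
    (fun (s : Bool × Bool) token =>
      if PySem.Str.endswith token "__en" then (true, s.2)
      else if PySem.Str.endswith token "__zh" then (s.1, true)
      else s) (false, false)
  if st.1 && st.2 then some 0
  else if st.1 then some 1
  else if st.2 then some 2
  else none

-- ===== PORT B =====
-- window is the Python str `window`, modelled as its char list (PySem string ops are defined on List Char)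
def detect_lang_alt (sentence : String) : Option Int :=
  let st := (sentence.toList ++ ['\n']).foldl
    (fun (s : Bool × Bool × List Char) ch =>
      if PySem.Chars.isspace ch then
        (s.1 || PySem.Chars.endswith s.2.2 ['_', '_', 'e', 'n'],
         s.2.1 || PySem.Chars.endswith s.2.2 ['_', '_', 'z', 'h'], ([] : List Char))
      else
        (s.1, s.2.1, PySem.Chars.slice s.2.2 (some (-3)) none ++ [ch]))
    (false, false, ([] : List Char))
  (PySem.Dict.ofList [((true, true), (0 : Int)), ((true, false), 1),
                      ((false, true), 2)]).get? (st.1, st.2.1)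

-- ===== PRECONDITION & SPEC =====
def Spec_detect_lang (sentence : String) (out : Option Int) : Prop := out = detect_lang_alt sentence
instance (sentence : String) (out : Option Int) : Decidable (Spec_detect_lang sentence out) := by unfold Spec_detect_lang; infer_instance

-- ===== CLAIM (what is proved, stated in full; the proofs are below) =====
def Claim_equal_detect_lang : Prop := ∀ (sentence : String), Dom_detect_lang sentence → Spec_detect_lang sentence (detect_lang sentence)

-- ===== LEMMAS AND PROOFS =====

-- a token cannot end with both "__en" and "__zh" (same length, different last chars)
lemma en_not_zh (t : List Char) (h : PySem.Chars.endswith t ['_', '_', 'e', 'n'] = true) :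
    PySem.Chars.endswith t ['_', '_', 'z', 'h'] = false := by
  by_contra hc
  rw [Bool.not_eq_false] at hc
  simp only [PySem.Chars.endswith_iff] at h hc
  obtain ⟨u, hu⟩ := h
  obtain ⟨v, hv⟩ := hc
  rw [← hu] at hv
  have := (List.append_inj' hv (by simp)).2
  simp at this

-- A's flag-cascading fold over the token list equals two independent suffix scans
lemma fold_eq (ts : List (List Char)) (en zh : Bool) :
    ts.foldl
      (fun (s : Bool × Bool) token =>
        if PySem.Chars.endswith token ['_', '_', 'e', 'n'] then (true, s.2)
        else if PySem.Chars.endswith token ['_', '_', 'z', 'h'] then (s.1, true)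
        else s) (en, zh)
    = (en || ts.any (fun token => PySem.Chars.endswith token ['_', '_', 'e', 'n']),
       zh || ts.any (fun token => PySem.Chars.endswith token ['_', '_', 'z', 'h'])) := by
  induction ts generalizing en zh with
  | nil => simp
  | cons t ts ih =>
    simp only [List.foldl_cons, List.any_cons]
    by_cases hen : PySem.Chars.endswith t ['_', '_', 'e', 'n'] = true
    · rw [if_pos hen, ih, hen, en_not_zh t hen]
      simp
    · rw [if_neg hen]
      rw [Bool.not_eq_true] at hen
      by_cases hzh : PySem.Chars.endswith t ['_', '_', 'z', 'h'] = true
      · rw [if_pos hzh, ih, hen, hzh]; simp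
      · rw [Bool.not_eq_true] at hzh
        rw [if_neg (by rw [hzh]; exact Bool.false_ne_true), ih, hen, hzh]; simp

-- split₀.go with a nonempty accumulator: the accumulated tokens are prepended
lemma go_acc (cs : List Char) (cur : List Char) (acc : List (List Char)) :
    PySem.Chars.split₀.go cs cur acc = acc.reverse ++ PySem.Chars.split₀.go cs cur [] := by
  induction cs generalizing cur acc with
  | nil =>
    rw [PySem.Chars.split₀.go.eq_def, PySem.Chars.split₀.go.eq_def]
    by_cases h : cur.isEmpty <;> simp [h]
  | cons c rest ih =>
    rw [PySem.Chars.split₀.go.eq_def]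
    conv_rhs => rw [PySem.Chars.split₀.go.eq_def]
    by_cases hs : PySem.Chars.isspace c
    · by_cases h : cur.isEmpty
      · simp only [hs, h, if_true]
        exact ih [] acc
      · simp only [hs, h, if_true, Bool.false_eq_true, if_false]
        rw [ih [] (cur.reverse :: acc), ih [] [cur.reverse]]
        simp
    · simp only [hs, Bool.false_eq_true, if_false]
      exact ih (c :: cur) acc

-- endswith a 4-char suffix only looks at the last 4 characters: the window suffices
lemma endswith_window (cur : List Char) (suf : List Char) (hl : suf.length = 4) :
    PySem.Chars.endswith ((cur.take 4).reverse) suf = PySem.Chars.endswith cur.reverse suf := by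
  have hsub : (cur.take 4).reverse <:+ cur.reverse := by
    conv_rhs => rw [← List.take_append_drop 4 cur]
    rw [List.reverse_append]
    exact List.suffix_append _ _
  have key : suf <:+ (cur.take 4).reverse ↔ suf <:+ cur.reverse := by
    constructor
    · exact fun h => h.trans hsub
    · intro h
      by_cases hlen : cur.length ≤ 4
      · rwa [List.take_of_length_le hlen]
      · have h1 : suf.reverse <+: cur.reverse.reverse := by
          rw [List.reverse_prefix]; exact h
        have h2 : (cur.take 4).reverse.reverse <+: cur.reverse.reverse := by
          rw [List.reverse_prefix]; exact hsub
        have h3 : suf.reverse <+: (cur.take 4).reverse.reverse :=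
          List.prefix_of_prefix_length_le h1 h2 (by
            simp [hl, List.length_take]; omega)
        rw [List.reverse_prefix] at h3
        exact h3
  rw [Bool.eq_iff_iff, PySem.Chars.endswith_iff, PySem.Chars.endswith_iff]
  exact key

-- window step: dropping to the last 3 chars and appending keeps the last-4 shape
lemma window_step (cur : List Char) (c : Char) :
    PySem.Chars.slice ((cur.take 4).reverse) (some (-3)) none ++ [c]
      = ((c :: cur).take 4).reverse := by
  have hs : ∀ l : List Char, PySem.Chars.slice l (some (-3)) none = l.drop (l.length - 3) := by
    intro l; simp [PySem.List.slice]
  rw [hs, List.length_reverse, List.drop_reverse, List.take_take]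
  have h4 : cur.take (min ((cur.take 4).length - ((cur.take 4).length - 3)) 4) = cur.take 3 := by
    rcases le_or_gt cur.length 3 with h | h
    · have e : min ((cur.take 4).length - ((cur.take 4).length - 3)) 4 = cur.length := by
        simp [List.length_take]; omega
      rw [e, List.take_length, List.take_of_length_le h]
    · have e : min ((cur.take 4).length - ((cur.take 4).length - 3)) 4 = 3 := by
        simp [List.length_take]; omega
      rw [e]
  rw [h4, show (4 : Nat) = 3 + 1 from rfl, List.take_succ_cons, List.reverse_cons]

lemma ends_nil_en : PySem.Chars.endswith ([] : List Char) ['_', '_', 'e', 'n'] = false := by decide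
lemma ends_nil_zh : PySem.Chars.endswith ([] : List Char) ['_', '_', 'z', 'h'] = false := by decide

-- the streaming scan over cs ++ ['\n'] computes the same flags as scanning split₀'s tokens
lemma scan_go (cs : List Char) (cur : List Char) (en zh : Bool) :
    (cs ++ ['\n']).foldl
      (fun (s : Bool × Bool × List Char) ch =>
        if PySem.Chars.isspace ch then
          (s.1 || PySem.Chars.endswith s.2.2 ['_', '_', 'e', 'n'],
           s.2.1 || PySem.Chars.endswith s.2.2 ['_', '_', 'z', 'h'], ([] : List Char))
        else
          (s.1, s.2.1, PySem.Chars.slice s.2.2 (some (-3)) none ++ [ch]))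
      (en, zh, (cur.take 4).reverse)
    = (en || (PySem.Chars.split₀.go cs cur []).any
          (fun t => PySem.Chars.endswith t ['_', '_', 'e', 'n']),
       zh || (PySem.Chars.split₀.go cs cur []).any
          (fun t => PySem.Chars.endswith t ['_', '_', 'z', 'h']), ([] : List Char)) := by
  induction cs generalizing cur en zh with
  | nil =>
    rw [PySem.Chars.split₀.go.eq_def]
    simp only [List.nil_append, List.foldl_cons, List.foldl_nil,
      show PySem.Chars.isspace '\n' = true from rfl, if_true]
    by_cases h : cur.isEmpty
    · rw [List.isEmpty_iff] at h
      subst h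
      simp [ends_nil_en, ends_nil_zh]
    · simp only [h, Bool.false_eq_true, if_false]
      rw [endswith_window cur ['_', '_', 'e', 'n'] rfl,
        endswith_window cur ['_', '_', 'z', 'h'] rfl]
      simp
  | cons c rest ih =>
    rw [PySem.Chars.split₀.go.eq_def]
    simp only [List.cons_append, List.foldl_cons]
    by_cases hs : PySem.Chars.isspace c
    · simp only [hs, if_true]
      by_cases h : cur.isEmpty
      · rw [List.isEmpty_iff] at h
        subst h
        have := ih [] (en || PySem.Chars.endswith (([] : List Char).take 4).reverse ['_', '_', 'e', 'n'])
          (zh || PySem.Chars.endswith (([] : List Char).take 4).reverse ['_', '_', 'z', 'h'])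
        simp only [List.take_nil, List.reverse_nil] at this ⊢
        rw [this]
        simp [ends_nil_en, ends_nil_zh]
      · simp only [h, Bool.false_eq_true, if_false]
        rw [endswith_window cur ['_', '_', 'e', 'n'] rfl,
          endswith_window cur ['_', '_', 'z', 'h'] rfl]
        have := ih [] (en || PySem.Chars.endswith cur.reverse ['_', '_', 'e', 'n'])
          (zh || PySem.Chars.endswith cur.reverse ['_', '_', 'z', 'h'])
        simp only [List.take_nil, List.reverse_nil] at this
        rw [this, go_acc rest [] [cur.reverse]]
        simp [Bool.or_assoc]
    · simp only [hs, Bool.false_eq_true, if_false]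
      rw [window_step cur c]
      exact ih (c :: cur) en zh

-- ===== VERDICT (by name: the statement is the Claim_ definition above) =====
theorem detect_lang_spec : Claim_equal_detect_lang := by
  intro sentence _
  unfold Spec_detect_lang detect_lang detect_lang_alt
  dsimp only
  have hA : (PySem.Str.split₀ sentence).foldl
      (fun (s : Bool × Bool) token =>
        if PySem.Str.endswith token "__en" then (true, s.2)
        else if PySem.Str.endswith token "__zh" then (s.1, true)
        else s) (false, false)
      = (false || (PySem.Chars.split₀ sentence.toList).any
            (fun t => PySem.Chars.endswith t ['_', '_', 'e', 'n']),
         false || (PySem.Chars.split₀ sentence.toList).any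
            (fun t => PySem.Chars.endswith t ['_', '_', 'z', 'h'])) := by
    rw [← PySem.Str.split₀_map_toList, ← fold_eq, List.foldl_map]
    rfl
  have hB := scan_go sentence.toList [] false false
  simp only [List.take_nil, List.reverse_nil] at hB
  rw [hA, hB]
  rw [show PySem.Chars.split₀ sentence.toList = PySem.Chars.split₀.go sentence.toList [] [] from rfl]
  cases (PySem.Chars.split₀.go sentence.toList [] []).any
      (fun t => PySem.Chars.endswith t ['_', '_', 'e', 'n']) <;>
    cases (PySem.Chars.split₀.go sentence.toList [] []).any
        (fun t => PySem.Chars.endswith t ['_', '_', 'z', 'h']) <;>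
      decide
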